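-- pv_equiv track=rewrite | github.com/Yogessh3/tcs-digital | tcs_dca_cq1.py | simplifyStringWithoutBuiltIn
-- ===== SOURCE A (Python) =====
-- def simplifyStringWithoutBuiltIn(string):
--     newString=[]
--     i=0
--     while i<len(string):
--         if string[i]=='8':
--             i+=1
--         elif i+1<len(string) and string[i]=='5' and string[i+1]=='3':
--             i+=2
--         else:
--             newString.append(string[i])
--             i+=1
--     return ''.join(newString).lower()
-- ===== SOURCE B (Python) =====
-- def simplifyStringWithoutBuiltIn(string):
--     return string.replace('53', '').replace('8', '').lower()
-- ===== Notes on version B (the rewrite author's own statement) =====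
-- stated objective: simpler
-- what changed: Replaces A's hand-written index-driven single-pass state machine (manual list building and join) with two library str.replace scans ('53' first, then '8') followed by .lower().
import Mathlib
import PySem

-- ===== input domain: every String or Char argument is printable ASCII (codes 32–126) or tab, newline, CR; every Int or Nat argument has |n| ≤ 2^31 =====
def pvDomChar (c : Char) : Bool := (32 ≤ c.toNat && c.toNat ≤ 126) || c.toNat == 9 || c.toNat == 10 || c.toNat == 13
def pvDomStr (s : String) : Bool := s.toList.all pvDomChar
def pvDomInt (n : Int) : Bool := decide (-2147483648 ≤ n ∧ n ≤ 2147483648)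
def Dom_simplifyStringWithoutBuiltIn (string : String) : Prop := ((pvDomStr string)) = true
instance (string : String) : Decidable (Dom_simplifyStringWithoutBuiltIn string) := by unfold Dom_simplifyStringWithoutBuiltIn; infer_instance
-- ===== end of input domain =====

-- B replaces A's hand-written index state machine by two library replace scans ('53' then '8')
-- followed by lower(); objective: simpler.

-- ===== PORT A =====
-- A's while loop over index i: skip '8', skip a '53' pair, else append the char; then join and lower.
def simAGo : List Char → List Char
  | [] => []
  | c :: rest =>
    if c = '8' then simAGo rest
    else if c = '5' ∧ rest.head? = some '3' then simAGo rest.tail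
    else c :: simAGo rest
  termination_by l => l.length
  decreasing_by all_goals (simp [List.length_tail]; try omega)

def simplifyStringWithoutBuiltIn (string : String) : String :=
  PySem.Str.lower (String.ofList (simAGo string.toList))

-- ===== PORT B =====
def simplifyStringWithoutBuiltIn_alt (string : String) : String :=
  PySem.Str.lower (PySem.Str.replace (PySem.Str.replace string "53" "") "8" "")

-- ===== PRECONDITION & SPEC =====
def Spec_simplifyStringWithoutBuiltIn (string : String) (out : String) : Prop := out = simplifyStringWithoutBuiltIn_alt string
instance (string : String) (out : String) : Decidable (Spec_simplifyStringWithoutBuiltIn string out) := by unfold Spec_simplifyStringWithoutBuiltIn; infer_instance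

-- ===== CLAIM (what is proved, stated in full; the proofs are below) =====
def Claim_equal_simplifyStringWithoutBuiltIn : Prop := ∀ (string : String), Dom_simplifyStringWithoutBuiltIn string → Spec_simplifyStringWithoutBuiltIn string (simplifyStringWithoutBuiltIn string)

-- ===== LEMMAS AND PROOFS =====

-- what the left-to-right non-overlapping removal of "53" leaves
def skip53 : List Char → List Char
  | [] => []
  | c :: rest =>
    if c = '5' ∧ rest.head? = some '3' then skip53 rest.tail
    else c :: skip53 rest
  termination_by l => l.length
  decreasing_by all_goals (simp [List.length_tail]; try omega)

theorem go53_eq (fuel : Nat) (l acc : List Char) (h : l.length ≤ fuel) :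
    PySem.Chars.replace.go ['5', '3'] [] fuel l acc = acc.reverse ++ skip53 l := by
  induction fuel generalizing l acc with
  | zero =>
    have hl : l = [] := List.eq_nil_of_length_eq_zero (by omega)
    subst hl
    simp [PySem.Chars.replace.go, skip53]
  | succ n ih =>
    match l with
    | [] => simp [PySem.Chars.replace.go, skip53]
    | c :: t =>
      rw [PySem.Chars.replace.go]
      by_cases hp : c = '5' ∧ t.head? = some '3'
      · obtain ⟨rfl, ht⟩ := hp
        cases t with
        | nil => simp at ht
        | cons d r =>
          simp only [List.head?_cons, Option.some.injEq] at ht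
          subst ht
          have hpre : List.isPrefixOf ['5', '3'] ('5' :: '3' :: r) = true := by
            simp [List.isPrefixOf]
          simp only [hpre, if_pos]
          rw [ih _ _ (by simp at h ⊢; omega)]
          rw [skip53]
          simp
      · have hpre : List.isPrefixOf ['5', '3'] (c :: t) = false := by
          cases t with
          | nil => simp [List.isPrefixOf]
          | cons d r =>
            simp [List.isPrefixOf]
            intro rfl5 h3
            exact hp ⟨rfl5.symm, by simp [← h3]⟩
        simp only [hpre, Bool.false_eq_true]
        rw [ih t (c :: acc) (by simp at h ⊢; omega), skip53, if_neg hp]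
        simp
    
theorem go8_eq (fuel : Nat) (l acc : List Char) (h : l.length ≤ fuel) :
    PySem.Chars.replace.go ['8'] [] fuel l acc = acc.reverse ++ l.filter (· ≠ '8') := by
  induction fuel generalizing l acc with
  | zero =>
    have hl : l = [] := List.eq_nil_of_length_eq_zero (by omega)
    subst hl
    simp [PySem.Chars.replace.go]
  | succ n ih =>
    match l with
    | [] => simp [PySem.Chars.replace.go]
    | c :: t =>
      rw [PySem.Chars.replace.go]
      by_cases hc : c = '8'
      · subst hc
        have hpre : List.isPrefixOf ['8'] ('8' :: t) = true := by simp [List.isPrefixOf]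
        simp only [hpre, if_pos]
        rw [ih _ _ (by simp at h ⊢; omega)]
        simp
      · have hpre : List.isPrefixOf ['8'] (c :: t) = false := by
          simp [List.isPrefixOf]; exact fun hx => hc hx.symm
        simp only [hpre, Bool.false_eq_true]
        rw [ih t (c :: acc) (by simp at h ⊢; omega)]
        simp [hc]

theorem replace53_eq (l : List Char) :
    PySem.Chars.replace l ['5', '3'] [] = skip53 l := by
  rw [PySem.Chars.replace]
  simp only [List.isEmpty_iff, reduceCtorEq, if_neg, not_false_iff]
  simpa using go53_eq l.length l [] le_rfl

theorem replace8_eq (l : List Char) :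
    PySem.Chars.replace l ['8'] [] = l.filter (· ≠ '8') := by
  rw [PySem.Chars.replace]
  simp only [List.isEmpty_iff, reduceCtorEq, if_neg, not_false_iff]
  simpa using go8_eq l.length l [] le_rfl

-- A's simultaneous skip equals: remove "53" pairs first, then filter out '8'
theorem simAGo_eq (l : List Char) :
    simAGo l = (skip53 l).filter (· ≠ '8') := by
  induction l using simAGo.induct with
  | case1 => simp [simAGo, skip53]
  | case2 rest ih =>
    rw [simAGo, if_pos rfl, skip53, if_neg (by rintro ⟨h, -⟩; simp at h)]
    simp [ih]
  | case3 c rest hc hp ih =>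
    obtain ⟨rfl, ht⟩ := hp
    rw [simAGo, if_neg hc, if_pos ⟨rfl, ht⟩, skip53, if_pos ⟨rfl, ht⟩, ih]
  | case4 c rest hc hp ih =>
    rw [simAGo, if_neg hc, if_neg hp, skip53, if_neg hp]
    simp [ih, hc]

-- ===== VERDICT (by name: the statement is the Claim_ definition above) =====
theorem simplifyStringWithoutBuiltIn_spec : Claim_equal_simplifyStringWithoutBuiltIn := by
  intro s _
  unfold Spec_simplifyStringWithoutBuiltIn
  unfold simplifyStringWithoutBuiltIn simplifyStringWithoutBuiltIn_alt
  rw [PySem.Str.lower, PySem.Str.lower]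
  refine congrArg String.ofList ?_
  rw [PySem.Str.toList_replace, PySem.Str.toList_replace]
  have h53 : ("53" : String).toList = ['5', '3'] := rfl
  have h8 : ("8" : String).toList = ['8'] := rfl
  have he : ("" : String).toList = [] := rfl
  rw [h53, h8, he, replace53_eq, replace8_eq]
  simp [simAGo_eq]
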